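-- pv_equiv track=rewrite | github.com/naveenjujaray/BI-Forge--AI-Powered-Power-BI-Report-Generator | ai_agents/specialized_agents_continued.py | _validate_project_structure
-- ===== SOURCE A (Python) =====
-- from typing import Dict, List, Any, Optional
--
-- def _validate_project_structure(project_files: Dict[str, Any]) -> Dict[str, Any]:
--     """Validate project structure."""
--     required_files = ['.pbip', '.Dataset', '.Report']
--     missing_files = []
--
--     for file_pattern in required_files:
--         if not any(file_pattern in str(file) for file in project_files.get('files', [])):
--             missing_files.append(file_pattern)
--
--     if missing_files:
--         return {
--             "task": "Validate project structure",
--             "status": "failed",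
--             "message": f"Missing required files: {', '.join(missing_files)}"
--         }
--
--     return {
--         "task": "Validate project structure",
--         "status": "success",
--         "message": "Project structure validation passed"
--     }
-- ===== SOURCE B (Python) =====
-- def _validate_project_structure(project_files):
--     """Validate project structure: single pass over the files collecting found patterns."""
--     required = ['.pbip', '.Dataset', '.Report']
--     found = set()
--     for f in project_files.get('files', []):
--         s = str(f)
--         found.update(p for p in required if p in s)
--     missing = [p for p in required if p not in found]
--     if missing:
--         status, message = "failed", "Missing required files: " + ", ".join(missing)
--     else:
--         status, message = "success", "Project structure validation passed"
--     return {"task": "Validate project structure", "status": status, "message": message}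
-- ===== Notes on version B (the rewrite author's own statement) =====
-- stated objective: alternative
-- what changed: Inverts the traversal: one pass over the files collecting the set of patterns each file matches (str(file) materialized once per file), then the missing list is read off the required list in order and a single dict is built from a computed (status, message) pair; A instead rescans the whole file list once per pattern and returns one of two separate dict literals.
import Mathlib
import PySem

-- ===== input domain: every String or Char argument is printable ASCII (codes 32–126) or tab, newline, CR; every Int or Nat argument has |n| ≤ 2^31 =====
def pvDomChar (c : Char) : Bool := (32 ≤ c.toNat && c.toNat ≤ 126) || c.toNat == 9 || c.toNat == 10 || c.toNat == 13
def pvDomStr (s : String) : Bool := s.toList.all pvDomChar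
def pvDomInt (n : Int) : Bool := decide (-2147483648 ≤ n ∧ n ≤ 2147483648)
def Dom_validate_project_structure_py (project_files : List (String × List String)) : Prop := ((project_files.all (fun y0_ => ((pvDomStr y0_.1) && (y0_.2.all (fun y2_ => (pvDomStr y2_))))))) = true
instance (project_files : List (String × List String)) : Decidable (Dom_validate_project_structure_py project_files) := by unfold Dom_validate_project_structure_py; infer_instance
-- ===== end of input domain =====

-- B inverts the traversal (one pass over the files collecting a found-set, one dict built from a
-- computed status/message pair) instead of A's scan of all files per pattern; return value proved identical.

-- ===== PORT A =====
def validate_project_structure_py (project_files : List (String × List String)) : List (String × String) :=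
  let required_files := [".pbip", ".Dataset", ".Report"]
  let files := PySem.Dict.getD (PySem.Dict.mk project_files) "files" []
  let missing_files := required_files.foldl
    (fun acc file_pattern =>
      if !(files.any (fun file => PySem.Str.isIn file_pattern file)) then acc ++ [file_pattern] else acc) []
  if missing_files ≠ [] then
    [("task", "Validate project structure"), ("status", "failed"),
     ("message", "Missing required files: " ++ PySem.Str.join ", " missing_files)]
  else
    [("task", "Validate project structure"), ("status", "success"),
     ("message", "Project structure validation passed")]

-- ===== PORT B =====
-- the patterns B looks for
def pvPatterns : List String := [".pbip", ".Dataset", ".Report"]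

-- the for-loop over the files: found.update(p for p in required if p in s) per file
def pvScan (found : PySem.Set String) : List String → PySem.Set String
  | [] => found
  | s :: rest => pvScan (PySem.Set.update found (pvPatterns.filter (fun p => PySem.Str.isIn p s))) rest

def validate_project_structure_py_alt (project_files : List (String × List String)) : List (String × String) :=
  let found := pvScan PySem.Set.empty (PySem.Dict.getD (PySem.Dict.mk project_files) "files" [])
  let missing := pvPatterns.filter (fun p => !(PySem.Set.contains found p))
  let sm : String × String :=
    if missing ≠ [] then ("failed", "Missing required files: " ++ PySem.Str.join ", " missing)
    else ("success", "Project structure validation passed")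
  [("task", "Validate project structure"), ("status", sm.1), ("message", sm.2)]

-- ===== PRECONDITION & SPEC =====
def Spec_validate_project_structure_py (project_files : List (String × List String)) (out : List (String × String)) : Prop := out = validate_project_structure_py_alt project_files
instance (project_files : List (String × List String)) (out : List (String × String)) : Decidable (Spec_validate_project_structure_py project_files out) := by unfold Spec_validate_project_structure_py; infer_instance

-- ===== CLAIM (what is proved, stated in full; the proofs are below) =====
def Claim_equal_validate_project_structure_py : Prop := ∀ (project_files : List (String × List String)), Dom_validate_project_structure_py project_files → Spec_validate_project_structure_py project_files (validate_project_structure_py project_files)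

-- ===== LEMMAS AND PROOFS =====

-- membership in the found-set after the pass over the files
theorem pv_scan_mem (files : List String) (fd : PySem.Set String) (p : String) :
    p ∈ pvScan fd files ↔ p ∈ fd ∨ (p ∈ pvPatterns ∧ ∃ s ∈ files, PySem.Str.isIn p s = true) := by
  induction files generalizing fd with
  | nil => simp [pvScan]
  | cons f files ih =>
    simp only [pvScan, ih, PySem.Set.mem_update, List.mem_filter, List.mem_cons]
    constructor
    · rintro ((h | ⟨hq, hs⟩) | ⟨hq, s, hsm, hs⟩)
      · exact Or.inl h
      · exact Or.inr ⟨hq, f, Or.inl rfl, hs⟩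
      · exact Or.inr ⟨hq, s, Or.inr hsm, hs⟩
    · rintro (h | ⟨hq, s, (rfl | hsm), hs⟩)
      · exact Or.inl (Or.inl h)
      · exact Or.inl (Or.inr ⟨hq, hs⟩)
      · exact Or.inr ⟨hq, s, hsm, hs⟩

-- ===== VERDICT (by name: the statement is the Claim_ definition above) =====
theorem validate_project_structure_py_spec : Claim_equal_validate_project_structure_py := by
  intro project_files _
  unfold Spec_validate_project_structure_py
  simp only [validate_project_structure_py, validate_project_structure_py_alt]
  have hmiss :
      ([".pbip", ".Dataset", ".Report"] : List String).foldl
        (fun acc file_pattern =>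
          if !((PySem.Dict.getD (PySem.Dict.mk project_files) "files" []).any
              (fun file => PySem.Str.isIn file_pattern file)) then acc ++ [file_pattern] else acc) []
      = pvPatterns.filter (fun p =>
          !(PySem.Set.contains
            (pvScan PySem.Set.empty (PySem.Dict.getD (PySem.Dict.mk project_files) "files" [])) p)) := by
    rw [PySem.List.foldl_append_if_eq_filter, List.nil_append]
    show pvPatterns.filter _ = _
    apply List.filter_congr
    intro p hp
    congr 1
    rw [Bool.eq_iff_iff, PySem.Set.contains_iff, pv_scan_mem]
    simp only [List.any_eq_true]
    constructor
    · rintro ⟨s, hsm, hs⟩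
      exact Or.inr ⟨hp, s, hsm, hs⟩
    · rintro (h | ⟨_, s, hsm, hs⟩)
      · exact absurd h (by simp [PySem.Set.empty])
      · exact ⟨s, hsm, hs⟩
  rw [hmiss]
  by_cases hm : (pvPatterns.filter (fun p =>
      !(PySem.Set.contains
        (pvScan PySem.Set.empty (PySem.Dict.getD (PySem.Dict.mk project_files) "files" [])) p))) = []
  · rw [if_neg (fun h => h hm), if_neg (fun h => h hm)]
  · rw [if_pos hm, if_pos hm]
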